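-- pv_equiv track=rewrite | github.com/usrKevin/CoPL | assignment2/strhelper.py | remove_excess_spaces
-- ===== SOURCE A (Python) =====
-- def remove_excess_spaces(s:str) -> str:
--     # remove excess spaces
--     while s.count("  ") > 0:
--         s = s.replace("  ", " ")
--     # remove spaces after closing bracket
--     l = list(s)
--     i = 0
--     is_bracket = False
--     while i < len(l):
--         if l[i] == ')':
--             is_bracket = True
--         elif l[i] == ' ':
--             if is_bracket:
--                 l.pop(i)
--                 continue
--         else:
--             is_bracket = False
--         i += 1
--     # remove spaces before opening bracket
--     i = len(l) - 1
--     is_bracket = False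
--     while i >= 0:
--         if l[i] == '(':
--             is_bracket = True
--         elif l[i] == ' ':
--             if is_bracket:
--                 l.pop(i)
--                 continue
--         else:
--             is_bracket = False
--         i -= 1
--     i = 0
--     is_lambda = False
--     while i < len(l):
--         if l[i] == '\\':
--             is_lambda = True
--         elif l[i] == ' ':
--             if is_lambda:
--                 l.pop(i)
--                 continue
--         else:
--             is_lambda = False
--         i += 1
--     return "".join(l)
-- ===== SOURCE B (Python) =====
-- def remove_excess_spaces(s: str) -> str:
--     # single pass: collapse runs of spaces
--     collapsed = []
--     for c in s:
--         if c == ' ' and collapsed and collapsed[-1] == ' ':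
--             continue
--         collapsed.append(c)
--     # one neighbour-driven filter: a (now isolated) space is dropped iff it
--     # follows ')' or '\', or precedes '('
--     prevs = [None] + collapsed[:-1]
--     nxts = collapsed[1:] + [None]
--     out = [c for c, p, n in zip(collapsed, prevs, nxts)
--            if not (c == ' ' and (p in (')', '\\') or n == '('))]
--     return "".join(out)
-- ===== Notes on version B (the rewrite author's own statement) =====
-- stated objective: faster
-- what changed: A repeatedly rescans the string (a replace-until-fixpoint loop plus three index loops that pop list elements in place) while B makes one linear pass that collapses space runs and then drops each isolated space by looking only at its two neighbours via zipped prev/next lists.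
import Mathlib
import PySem

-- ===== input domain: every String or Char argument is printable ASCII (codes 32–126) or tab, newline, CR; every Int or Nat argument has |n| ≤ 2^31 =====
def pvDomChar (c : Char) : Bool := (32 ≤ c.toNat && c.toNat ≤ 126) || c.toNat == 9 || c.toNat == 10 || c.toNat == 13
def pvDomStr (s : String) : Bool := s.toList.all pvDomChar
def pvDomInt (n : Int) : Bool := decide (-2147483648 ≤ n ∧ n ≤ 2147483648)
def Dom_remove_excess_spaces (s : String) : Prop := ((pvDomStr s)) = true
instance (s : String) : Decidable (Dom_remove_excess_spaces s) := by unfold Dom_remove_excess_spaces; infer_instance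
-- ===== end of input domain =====

-- B replaces A's repeated rescans (replace-until-fixpoint plus three in-place pop loops) by one
-- linear collapse pass followed by a single neighbour-driven filter; equivalence proved on all inputs.

-- ===== PORT A =====
-- `while s.count("  ") > 0: s = s.replace("  ", " ")` — fuel-guarded (the string shrinks each
-- iteration, so fuel = length suffices; proved in collapseA_eq below)
def collapseA : Nat → List Char → List Char
  | 0, l => l
  | fuel + 1, l =>
    if 0 < PySem.Chars.count l [' ', ' '] then
      collapseA fuel (PySem.Chars.replace l [' ', ' '] [' '])
    else l


-- the two forward `while i < len(l)` loops of A (trigger char ')' resp. '\\') — fuel-guarded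
-- (len(l) - i strictly decreases each iteration, so fuel = length suffices; passFwd_eq below)
def passFwd (tc : Char) : Nat → List Char → Nat → Bool → List Char
  | 0, l, _, _ => l
  | fuel + 1, l, i, flag =>
    if h : i < l.length then
      if l[i] = tc then passFwd tc fuel l (i + 1) true
      else if l[i] = ' ' then
        if flag then passFwd tc fuel (l.eraseIdx i) i flag
        else passFwd tc fuel l (i + 1) flag
      else passFwd tc fuel l (i + 1) false
    else l

-- the backward `while i >= 0` loop of A (trigger char '(') — fuel-guarded
-- ((i+1) + len(l) strictly decreases each iteration, so fuel = 2*length suffices; passBwd_eq below)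
def passBwd : Nat → List Char → Int → Bool → List Char
  | 0, l, _, _ => l
  | fuel + 1, l, i, flag =>
    if 0 ≤ i then
      match PySem.List.pyGet? l i with
      | none => l   -- unreachable: Python's index stays in range in this loop
      | some c =>
        if c = '(' then passBwd fuel l (i - 1) true
        else if c = ' ' then
          if flag then passBwd fuel (l.eraseIdx i.toNat) i flag
          else passBwd fuel l (i - 1) flag
        else passBwd fuel l (i - 1) false
    else l

def remove_excess_spaces (s : String) : String :=
  let l0 := collapseA s.toList.length s.toList
  let l1 := passFwd ')' l0.length l0 0 false
  let l2 := passBwd (l1.length + l1.length) l1 (PySem.List.len l1 - 1) false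
  let l3 := passFwd '\\' l2.length l2 0 false
  String.ofList l3   -- "".join(l)

-- ===== PORT B =====
def remove_excess_spaces_alt (s : String) : String :=
  -- collapse runs of spaces in one pass
  let collapsed := s.toList.foldl
    (fun acc c => if c = ' ' ∧ acc.getLast? = some ' ' then acc else acc ++ [c]) []
  -- prevs = [None] + collapsed[:-1] ; nxts = collapsed[1:] + [None]
  let prevs : List (Option Char) := none :: (PySem.List.slice collapsed none (some (-1))).map some
  let nxts : List (Option Char) := (PySem.List.slice collapsed (some 1) none).map some ++ [none]
  -- zip(collapsed, prevs, nxts) ported as nested pairs (c, (p, n))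
  let out := ((collapsed.zip (prevs.zip nxts)).filter
      (fun x => !(x.1 == ' ' && (x.2.1 == some ')' || x.2.1 == some '\\' || x.2.2 == some '(')))).map (·.1)
  String.ofList out

-- ===== PRECONDITION & SPEC =====
def Spec_remove_excess_spaces (s : String) (out : String) : Prop := out = remove_excess_spaces_alt s
instance (s : String) (out : String) : Decidable (Spec_remove_excess_spaces s out) := by unfold Spec_remove_excess_spaces; infer_instance

-- ===== CLAIM (what is proved, stated in full; the proofs are below) =====
def Claim_equal_remove_excess_spaces : Prop := ∀ (s : String), Dom_remove_excess_spaces s → Spec_remove_excess_spaces s (remove_excess_spaces s)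

-- ===== LEMMAS AND PROOFS =====

-- structural descriptions of replace("  "," ") / count("  ") (used only in proofs)
def repSp : List Char → List Char
  | [] => []
  | [c] => [c]
  | c :: d :: t => if c = ' ' ∧ d = ' ' then ' ' :: repSp t else c :: repSp (d :: t)

def cntSp : List Char → Nat
  | [] => 0
  | [_] => 0
  | c :: d :: t => if c = ' ' ∧ d = ' ' then cntSp t + 1 else cntSp (d :: t)

theorem go_repSp : ∀ (fuel : Nat) (l acc : List Char), l.length ≤ fuel →
    PySem.Chars.replace.go [' ', ' '] [' '] fuel l acc = acc.reverse ++ repSp l := by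
  intro fuel
  induction fuel with
  | zero =>
    intro l acc h
    have : l = [] := List.eq_nil_of_length_eq_zero (Nat.le_zero.mp h)
    subst this
    simp [PySem.Chars.replace.go, repSp]
  | succ n ih =>
    intro l acc h
    match l with
    | [] => simp [PySem.Chars.replace.go, repSp]
    | [c] =>
      have hpre : ([' ', ' '].isPrefixOf [c]) = false := by
        simp [List.isPrefixOf]
      simp only [PySem.Chars.replace.go, hpre, Bool.false_eq_true, if_false]
      rw [ih [] (c :: acc) (by simp)]
      simp [repSp]
    | c :: d :: t =>
      by_cases hcd : c = ' ' ∧ d = ' '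
      · obtain ⟨hc, hd⟩ := hcd
        subst hc; subst hd
        have hpre : ([' ', ' '].isPrefixOf (' ' :: ' ' :: t)) = true := by
          simp [List.isPrefixOf]
        simp only [PySem.Chars.replace.go, hpre, if_true]
        rw [show List.drop [' ', ' '].length (' ' :: ' ' :: t) = t from rfl]
        rw [ih t ([' '].reverse ++ acc) (by simp at h ⊢; omega)]
        simp [repSp]
      · have hpre : ([' ', ' '].isPrefixOf (c :: d :: t)) = false := by
          simp [List.isPrefixOf]
          intro h1 h2
          exact hcd ⟨h1.symm, h2.symm⟩
        simp only [PySem.Chars.replace.go, hpre, Bool.false_eq_true, if_false]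
        rw [ih (d :: t) (c :: acc) (by simp at h ⊢; omega)]
        simp [repSp, hcd]

theorem repSp_eq (l : List Char) : PySem.Chars.replace l [' ', ' '] [' '] = repSp l := by
  have h := go_repSp l.length l [] le_rfl
  simp only [PySem.Chars.replace]
  simpa using h

theorem go_cntSp : ∀ (fuel : Nat) (l : List Char) (acc : Nat), l.length ≤ fuel →
    PySem.Chars.count.go [' ', ' '] fuel l acc = acc + cntSp l := by
  intro fuel
  induction fuel with
  | zero =>
    intro l acc h
    have : l = [] := List.eq_nil_of_length_eq_zero (Nat.le_zero.mp h)
    subst this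
    simp [PySem.Chars.count.go, cntSp]
  | succ n ih =>
    intro l acc h
    match l with
    | [] => simp [PySem.Chars.count.go, cntSp]
    | [c] =>
      have hpre : ([' ', ' '].isPrefixOf [c]) = false := by
        simp [List.isPrefixOf]
      simp only [PySem.Chars.count.go, hpre, Bool.false_eq_true, if_false]
      rw [ih [] acc (by simp)]
      simp [cntSp]
    | c :: d :: t =>
      by_cases hcd : c = ' ' ∧ d = ' '
      · obtain ⟨hc, hd⟩ := hcd
        subst hc; subst hd
        have hpre : ([' ', ' '].isPrefixOf (' ' :: ' ' :: t)) = true := by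
          simp [List.isPrefixOf]
        simp only [PySem.Chars.count.go, hpre, if_true]
        rw [show List.drop [' ', ' '].length (' ' :: ' ' :: t) = t from rfl]
        rw [ih t (acc + 1) (by simp at h ⊢; omega)]
        simp [cntSp]; omega
      · have hpre : ([' ', ' '].isPrefixOf (c :: d :: t)) = false := by
          simp [List.isPrefixOf]
          intro h1 h2
          exact hcd ⟨h1.symm, h2.symm⟩
        simp only [PySem.Chars.count.go, hpre, Bool.false_eq_true, if_false]
        rw [ih (d :: t) acc (by simp at h ⊢; omega)]
        simp [cntSp, hcd]

theorem cntSp_eq (l : List Char) : PySem.Chars.count l [' ', ' '] = cntSp l := by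
  have h := go_cntSp l.length l 0 le_rfl
  simp only [PySem.Chars.count]
  simpa using h

theorem repSp_length : ∀ l : List Char, (repSp l).length + cntSp l = l.length := by
  intro l
  induction l using repSp.induct with
  | case1 => simp [repSp, cntSp]
  | case2 c => simp [repSp, cntSp]
  | case3 c d t h ih => simp [repSp, cntSp, h]; omega
  | case4 c d t h ih => simp [repSp, cntSp, h] at ih ⊢; omega

theorem replace_len_lt (l : List Char) (h : 0 < PySem.Chars.count l [' ', ' ']) :
    (PySem.Chars.replace l [' ', ' '] [' ']).length < l.length := by
  rw [repSp_eq]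
  rw [cntSp_eq] at h
  have := repSp_length l
  omega


-- "no two adjacent spaces"
def spR (a b : Char) : Prop := ¬(a = ' ' ∧ b = ' ')

-- canonical space-collapse, carrying the previous emitted char
def col : Option Char → List Char → List Char
  | _, [] => []
  | p, c :: t => if c = ' ' ∧ p = some ' ' then col p t else c :: col (some c) t

-- drop a space whose previous char is `tc`, carrying the previous char
def sF (tc : Char) : Option Char → List Char → List Char
  | _, [] => []
  | p, c :: t => if c = ' ' ∧ p = some tc then sF tc (some c) t else c :: sF tc (some c) t

-- the state machine A's forward/backward loops implement (flag instead of prev char)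
def pF (tc : Char) : Bool → List Char → List Char
  | _, [] => []
  | f, c :: t =>
    if c = tc then c :: pF tc true t
    else if c = ' ' then (if f then pF tc f t else c :: pF tc false t)
    else c :: pF tc false t

-- the char following the current position (sentinel p at the right end)
def nxtOf : List Char → Option Char → Option Char
  | [], p => p
  | d :: _, _ => some d

-- drop a space whose next char is '('
def sN : List Char → Option Char → List Char
  | [], _ => []
  | c :: t, p => if c = ' ' ∧ nxtOf t p = some '(' then sN t p else c :: sN t p

-- the combined one-pass filter B implements
def comb : Option Char → List Char → List Char
  | _, [] => []
  | p, c :: t =>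
    if c = ' ' ∧ (p = some ')' ∨ p = some '\\' ∨ t.head? = some '(') then comb (some c) t
    else c :: comb (some c) t

-- B's collapse fold computes col
theorem foldl_col : ∀ (l acc : List Char),
    l.foldl (fun acc c => if c = ' ' ∧ acc.getLast? = some ' ' then acc else acc ++ [c]) acc
      = acc ++ col acc.getLast? l := by
  intro l
  induction l with
  | nil => intro acc; simp [col]
  | cons c t ih =>
    intro acc
    by_cases hc : c = ' ' ∧ acc.getLast? = some ' '
    · simp only [List.foldl_cons, if_pos hc]
      rw [ih acc, col]
      simp [hc.1, hc.2]
    · simp only [List.foldl_cons, if_neg hc]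
      rw [ih (acc ++ [c]), col]
      simp [if_neg hc, List.append_assoc]

-- a string without "  " is a fixpoint of col
theorem col_of_cntSp_zero : ∀ (l : List Char) (p : Option Char), cntSp l = 0 →
    (p = some ' ' → l.head? ≠ some ' ') → col p l = l := by
  intro l
  induction l using cntSp.induct with
  | case1 => intro p _ _; simp [col]
  | case2 c =>
    intro p _ hhd
    have hc : ¬(c = ' ' ∧ p = some ' ') := by
      rintro ⟨h1, h2⟩; exact hhd h2 (by simp [h1])
    simp [col, hc]
  | case3 c d t h ih =>
    intro p hcnt _
    simp [cntSp, h] at hcnt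
  | case4 c d t h ih =>
    intro p hcnt hhd
    have hc : ¬(c = ' ' ∧ p = some ' ') := by
      rintro ⟨h1, h2⟩; exact hhd h2 (by simp [h1])
    rw [col, if_neg hc]
    rw [cntSp, if_neg h] at hcnt
    rw [ih (some c) hcnt]
    intro h1 h2
    simp at h2
    exact h ⟨by injection h1, h2⟩

-- col is invariant under one replace("  "," ") step
theorem col_repSp : ∀ (l : List Char) (p : Option Char), col p (repSp l) = col p l := by
  intro l
  induction l using repSp.induct with
  | case1 => intro p; simp [repSp]
  | case2 c => intro p; simp [repSp]
  | case3 c d t h ih =>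
    intro p
    obtain ⟨hc, hd⟩ := h
    subst hc; subst hd
    by_cases hp : p = some ' '
    · simp [repSp, col, hp, ih]
    · simp [repSp, col, hp, ih]
  | case4 c d t h ih =>
    intro p
    rw [repSp, if_neg h]
    by_cases hcp : c = ' ' ∧ p = some ' '
    · simp [col, hcp, ih]
    · simp [col, hcp, ih]

-- A's replace-until-fixpoint loop computes col
theorem collapseA_eq : ∀ (fuel : Nat) (l : List Char), l.length ≤ fuel →
    collapseA fuel l = col none l := by
  intro fuel
  induction fuel with
  | zero =>
    intro l h
    have : l = [] := List.eq_nil_of_length_eq_zero (Nat.le_zero.mp h)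
    subst this
    rfl
  | succ fuel ih =>
    intro l h
    by_cases hc : 0 < PySem.Chars.count l [' ', ' ']
    · rw [collapseA, if_pos hc]
      rw [ih _ (by have := replace_len_lt l hc; omega), repSp_eq, col_repSp]
    · rw [collapseA, if_neg hc]
      have h0 : cntSp l = 0 := by rw [← cntSp_eq]; omega
      exact (col_of_cntSp_zero l none h0 (by simp)).symm

-- col output has no adjacent spaces
theorem chain_col : ∀ (l : List Char) (p : Option Char),
    (col p l).IsChain spR ∧ (p = some ' ' → (col p l).head? ≠ some ' ') := by
  intro l
  induction l with
  | nil => intro p; simp [col]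
  | cons c t ih =>
    intro p
    by_cases hc : c = ' ' ∧ p = some ' '
    · rw [col, if_pos hc]
      exact ⟨(ih p).1, fun _ => (ih p).2 hc.2⟩
    · rw [col, if_neg hc]
      constructor
      · rw [List.isChain_cons]
        refine ⟨fun b hb => ?_, (ih (some c)).1⟩
        rw [Option.mem_def] at hb
        rintro ⟨hc1, hb1⟩
        subst hb1
        exact (ih (some c)).2 (by rw [hc1]) hb
      · intro hp
        simp only [List.head?_cons, ne_eq, Option.some.injEq]
        intro hcs
        exact hc ⟨hcs, hp⟩

-- sF preserves "no adjacent spaces"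
theorem chain_sF (tc : Char) : ∀ (l : List Char) (p : Option Char), l.IsChain spR →
    (sF tc p l).IsChain spR ∧ ((sF tc p l).head? = some ' ' → l.head? = some ' ') := by
  intro l
  induction l with
  | nil => intro p _; simp [sF]
  | cons c t ih =>
    intro p hch
    have hcht : t.IsChain spR := (List.isChain_cons.mp hch).2
    have hR : ∀ b ∈ t.head?, spR c b := (List.isChain_cons.mp hch).1
    by_cases hc : c = ' ' ∧ p = some tc
    · rw [sF, if_pos hc]
      refine ⟨(ih (some c) hcht).1, fun hh => by simp [hc.1]⟩
    · rw [sF, if_neg hc]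
      constructor
      · rw [List.isChain_cons]
        refine ⟨fun b hb => ?_, (ih (some c) hcht).1⟩
        rw [Option.mem_def] at hb
        rintro ⟨hc1, hb1⟩
        subst hb1
        have ht' : t.head? = some ' ' := (ih (some c) hcht).2 hb
        exact hR ' ' (Option.mem_def.mpr ht') ⟨hc1, rfl⟩
      · intro hh
        simpa using hh

-- on space-collapsed input the flag machine is the prev-char filter
theorem pF_eq_sF (tc : Char) (htc : tc ≠ ' ') : ∀ (l : List Char) (f : Bool) (p : Option Char),
    l.IsChain spR → (p = some ' ' → l.head? ≠ some ' ') →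
    ((f = true ↔ p = some tc) ∨ p = some ' ') → pF tc f l = sF tc p l := by
  intro l
  induction l with
  | nil => intro f p _ _ _; simp [pF, sF]
  | cons c t ih =>
    intro f p hch hhd hrel
    have hcht : t.IsChain spR := (List.isChain_cons.mp hch).2
    have hR : ∀ b ∈ t.head?, spR c b := (List.isChain_cons.mp hch).1
    by_cases hct : c = tc
    · subst hct
      rw [pF, if_pos rfl, sF, if_neg (fun hh => htc hh.1)]
      exact congrArg _ (ih true (some c) hcht
        (fun hh => absurd (Option.some.inj hh) htc) (Or.inl (by simp)))
    · by_cases hcs : c = ' '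
      · subst hcs
        have hp : p ≠ some ' ' := fun hh => hhd hh (by simp)
        have hrel' : f = true ↔ p = some tc := hrel.resolve_right hp
        have hside : (some ' ' : Option Char) = some ' ' → t.head? ≠ some ' ' := by
          intro _ hh
          exact hR ' ' (Option.mem_def.mpr hh) ⟨rfl, rfl⟩
        cases f with
        | true =>
          have hptc : p = some tc := hrel'.mp rfl
          rw [pF, if_neg hct, if_pos rfl, if_pos rfl, sF, if_pos ⟨rfl, hptc⟩]
          exact ih true (some ' ') hcht hside (Or.inr rfl)
        | false =>
          have hptc : p ≠ some tc := fun hh => absurd (hrel'.mpr hh) (by simp)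
          rw [pF, if_neg hct, if_pos rfl, if_neg (by simp), sF, if_neg (fun hh => hptc hh.2)]
          exact congrArg _ (ih false (some ' ') hcht hside (Or.inr rfl))
      · rw [pF, if_neg hct, if_neg hcs, sF, if_neg (fun hh => hcs hh.1)]
        exact congrArg _ (ih false (some c) hcht
          (fun hh => absurd (Option.some.inj hh) hcs) (Or.inl (by simp [hct])))

theorem take_step (l : List Char) (i : Nat) (h : i < l.length) :
    l.take (i + 1) = l.take i ++ [l[i]] := by
  rw [List.take_succ]
  simp [List.getElem?_eq_getElem h]

-- A's forward pop-loop is the pF machine on the suffix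
theorem passFwd_eq (tc : Char) : ∀ (N : Nat) (l : List Char) (i : Nat) (f : Bool),
    l.length - i ≤ N → passFwd tc N l i f = l.take i ++ pF tc f (l.drop i) := by
  intro N
  induction N with
  | zero =>
    intro l i f hN
    have hge : l.length ≤ i := by omega
    rw [passFwd]
    simp [List.take_of_length_le hge, List.drop_eq_nil_of_le hge, pF]
  | succ N ih =>
    intro l i f hN
    by_cases h : i < l.length
    · rw [passFwd, dif_pos h]
      have hdrop : l.drop i = l[i] :: l.drop (i + 1) := (List.getElem_cons_drop h).symm
      by_cases h1 : l[i] = tc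
      · rw [if_pos h1, ih l (i + 1) true (by omega)]
        rw [hdrop, pF, if_pos h1, take_step l i h, List.append_assoc, List.singleton_append]
      · rw [if_neg h1]
        by_cases h2 : l[i] = ' '
        · rw [if_pos h2]
          cases f with
          | true =>
            rw [if_pos rfl]
            rw [ih (l.eraseIdx i) i true (by rw [List.length_eraseIdx_of_lt h]; omega)]
            have he : l.eraseIdx i = l.take i ++ l.drop (i + 1) := List.eraseIdx_eq_take_drop_succ l i
            have hlt : (l.take i).length = i := List.length_take_of_le (Nat.le_of_lt h)
            have e1 : (l.eraseIdx i).take i = l.take i := by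
              rw [he, List.take_append, hlt, Nat.sub_self, List.take_zero, List.append_nil,
                List.take_take, Nat.min_self]
            have e2 : (l.eraseIdx i).drop i = l.drop (i + 1) := by
              rw [he, List.drop_append, hlt, Nat.sub_self, List.drop_zero,
                List.drop_eq_nil_of_le (le_of_eq hlt), List.nil_append]
            rw [e1, e2, hdrop, pF, if_neg h1, if_pos h2, if_pos rfl]
          | false =>
            rw [if_neg (by simp), ih l (i + 1) false (by omega)]
            rw [hdrop, pF, if_neg h1, if_pos h2, if_neg (by simp), take_step l i h,
              List.append_assoc, List.singleton_append]
        · rw [if_neg h2, ih l (i + 1) false (by omega)]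
          rw [hdrop, pF, if_neg h1, if_neg h2, take_step l i h, List.append_assoc,
            List.singleton_append]
    · rw [passFwd, dif_neg h]
      have hge : l.length ≤ i := by omega
      simp [List.take_of_length_le hge, List.drop_eq_nil_of_le hge, pF]

theorem passBwd_neg : ∀ (fuel : Nat) (l : List Char) (i : Int) (f : Bool), i < 0 →
    passBwd fuel l i f = l := by
  intro fuel l i f hi
  cases fuel with
  | zero => rfl
  | succ fuel => rw [passBwd, if_neg (by omega)]

-- A's backward pop-loop is the pF machine on the reversed prefix
theorem passBwd_eq : ∀ (N : Nat) (l : List Char) (j : Nat) (f : Bool), l.length + j ≤ N →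
    j < l.length →
    (f = true → l[j]? = some '(' ∨ l[j + 1]? = some '(') →
    passBwd N l (j : Int) f = (pF '(' f ((l.take (j + 1)).reverse)).reverse ++ l.drop (j + 1) := by
  intro N
  induction N with
  | zero => intro l j f h hj _; omega
  | succ N ih =>
    intro l j f hN hj hf
    have hget : PySem.List.pyGet? l (j : Int) = some l[j] := by
      rw [PySem.List.pyGet?_natCast]
      exact List.getElem?_eq_getElem hj
    have htk : (l.take (j + 1)).reverse = l[j] :: (l.take j).reverse := by
      rw [take_step l j hj]; simp
    rw [passBwd, if_pos (show (0 : Int) ≤ (j : Int) by omega)]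
    split
    next heq => rw [hget] at heq; simp at heq
    next c heq =>
      have hc : c = l[j] := by rw [hget] at heq; exact (Option.some.inj heq).symm
      subst hc
      by_cases h1 : l[j] = '('
      · rw [if_pos h1]
        cases j with
        | zero =>
          rw [show ((0 : Nat) : Int) - 1 = -1 by omega, passBwd_neg N l (-1) true (by omega)]
          rw [htk, pF, if_pos h1]
          simp only [List.take_zero, List.reverse_nil, pF, List.reverse_cons, List.nil_append,
            List.singleton_append]
          exact (List.getElem_cons_drop hj).symm
        | succ j' =>
          rw [show ((j' + 1 : Nat) : Int) - 1 = (j' : Int) by omega]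
          rw [ih l j' true (by omega) (by omega)
            (fun _ => Or.inr (by rw [List.getElem?_eq_getElem hj, h1]))]
          rw [htk, pF, if_pos h1, List.reverse_cons, List.append_assoc, List.singleton_append,
            List.getElem_cons_drop hj]
      · rw [if_neg h1]
        by_cases h2 : l[j] = ' '
        · rw [if_pos h2]
          cases f with
          | true =>
            rw [if_pos rfl]
            have hnx : l[j + 1]? = some '(' := by
              rcases hf rfl with hh | hh
              · rw [List.getElem?_eq_getElem hj, h2] at hh; simp at hh
              · exact hh
            have hj1 : j + 1 < l.length := (List.getElem?_eq_some_iff.mp hnx).1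
            have hnxv : l[j + 1] = '(' := by
              rw [List.getElem?_eq_getElem hj1] at hnx; exact Option.some.inj hnx
            have he : l.eraseIdx j = l.take j ++ l.drop (j + 1) := List.eraseIdx_eq_take_drop_succ l j
            have hlt : (l.take j).length = j := List.length_take_of_le (Nat.le_of_lt hj)
            have hEg : (l.eraseIdx j)[j]? = some '(' := by
              rw [he, List.getElem?_append_right (le_of_eq hlt), hlt, Nat.sub_self,
                List.getElem?_drop]
              simpa using hnx
            have e1 : (l.eraseIdx j).take (j + 1) = l.take j ++ [l[j + 1]] := by
              rw [he, List.take_append, hlt, List.take_take,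
                show min (j + 1) j = j from by omega,
                show j + 1 - j = 1 from by omega,
                List.take_one, List.head?_drop, List.getElem?_eq_getElem hj1]
              rfl
            have e2 : (l.eraseIdx j).drop (j + 1) = l.drop (j + 1 + 1) := by
              rw [he, List.drop_append, hlt,
                List.drop_eq_nil_of_le (by omega : (l.take j).length ≤ j + 1),
                List.nil_append, show j + 1 - j = 1 from by omega, List.drop_drop]
            simp only [Int.toNat_natCast]
            rw [ih (l.eraseIdx j) j true (by rw [List.length_eraseIdx_of_lt hj]; omega)
              (by rw [List.length_eraseIdx_of_lt hj]; omega) (fun _ => Or.inl hEg)]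
            rw [htk, pF, if_neg h1, if_pos h2, if_pos rfl]
            rw [e1, e2, List.reverse_append, List.reverse_singleton, List.singleton_append, hnxv]
            rw [pF, if_pos rfl, List.reverse_cons, List.append_assoc, List.singleton_append]
            rw [← hnxv, List.getElem_cons_drop hj1]
          | false =>
            rw [if_neg (by simp)]
            cases j with
            | zero =>
              rw [show ((0 : Nat) : Int) - 1 = -1 by omega, passBwd_neg N l (-1) false (by omega)]
              rw [htk, pF, if_neg h1, if_pos h2, if_neg (by simp)]
              simp only [List.take_zero, List.reverse_nil, pF, List.reverse_cons, List.nil_append,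
                List.singleton_append]
              exact (List.getElem_cons_drop hj).symm
            | succ j' =>
              rw [show ((j' + 1 : Nat) : Int) - 1 = (j' : Int) by omega]
              rw [ih l j' false (by omega) (by omega) (by simp)]
              rw [htk, pF, if_neg h1, if_pos h2, if_neg (by simp), List.reverse_cons,
                List.append_assoc, List.singleton_append, List.getElem_cons_drop hj]
        · rw [if_neg h2]
          cases j with
          | zero =>
            rw [show ((0 : Nat) : Int) - 1 = -1 by omega, passBwd_neg N l (-1) false (by omega)]
            rw [htk, pF, if_neg h1, if_neg h2]
            simp only [List.take_zero, List.reverse_nil, pF, List.reverse_cons, List.nil_append,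
              List.singleton_append]
            exact (List.getElem_cons_drop hj).symm
          | succ j' =>
            rw [show ((j' + 1 : Nat) : Int) - 1 = (j' : Int) by omega]
            rw [ih l j' false (by omega) (by omega) (by simp)]
            rw [htk, pF, if_neg h1, if_neg h2, List.reverse_cons, List.append_assoc,
              List.singleton_append, List.getElem_cons_drop hj]

-- the "previous char" state after scanning xs (p if xs is empty)
def stA (xs : List Char) (p : Option Char) : Option Char :=
  match xs.getLast? with | some c => some c | none => p

theorem sF_append (tc : Char) : ∀ (xs ys : List Char) (p : Option Char),
    sF tc p (xs ++ ys) = sF tc p xs ++ sF tc (stA xs p) ys := by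
  intro xs
  induction xs with
  | nil => intro ys p; simp [sF, stA]
  | cons c t ih =>
    intro ys p
    have hst : stA (c :: t) p = stA t (some c) := by
      cases hgl : t.getLast? with
      | none =>
        have : t = [] := by simpa using hgl
        subst this
        simp [stA]
      | some e =>
        cases t with
        | nil => simp at hgl
        | cons d u => simp [stA, List.getLast?_cons_cons, hgl]
    rw [List.cons_append]
    by_cases hc : c = ' ' ∧ p = some tc
    · rw [sF, if_pos hc, sF, if_pos hc, ih, hst]
    · rw [sF, if_neg hc, sF, if_neg hc, ih, hst]
      simp

-- prev-char filter on the reverse = next-char filter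
theorem sF_rev : ∀ (m : List Char) (p : Option Char), (sF '(' p m.reverse).reverse = sN m p := by
  intro m
  induction m with
  | nil => intro p; simp [sF, sN]
  | cons c ms ih =>
    intro p
    rw [List.reverse_cons, sF_append '(' ms.reverse [c] p, List.reverse_append]
    have hsingle : ∀ q : Option Char, sF '(' q [c] = if c = ' ' ∧ q = some '(' then [] else [c] := by
      intro q; by_cases h : c = ' ' ∧ q = some '(' <;> simp [sF, h]
    cases ms with
    | nil =>
      rw [show stA (([] : List Char)).reverse p = p from by simp [stA]]
      rw [hsingle p]
      by_cases h : c = ' ' ∧ p = some '(' <;> simp [sF, sN, nxtOf, h]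
    | cons d u =>
      rw [show stA ((d :: u).reverse) p = some d from by simp [stA, List.getLast?_reverse]]
      rw [hsingle (some d), ih p]
      by_cases h : c = ' ' ∧ d = '('
      · rw [if_pos (by simp [h.1, h.2]),
          show sN (c :: d :: u) p = sN (d :: u) p from by
            rw [sN, if_pos ⟨h.1, by simp [nxtOf, h.2]⟩]]
        simp
      · rw [if_neg (fun hh => h ⟨hh.1, Option.some.inj hh.2⟩),
          show sN (c :: d :: u) p = c :: sN (d :: u) p from by
            rw [sN, if_neg (fun hh => h ⟨hh.1, Option.some.inj hh.2⟩)]]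
        simp

theorem spR_symm {a b : Char} (h : spR a b) : spR b a := by
  simp only [spR] at *
  tauto

theorem chain_reverse_spR {l : List Char} (h : l.IsChain spR) : l.reverse.IsChain spR := by
  rw [List.isChain_reverse]
  refine h.imp ?_
  intro a b hab
  exact spR_symm hab

-- composing the three single-trigger filters gives B's combined filter
theorem comp_eq : ∀ (n : Nat) (l : List Char) (p : Option Char), l.length ≤ n → l.IsChain spR →
    (p = some ' ' → l.head? ≠ some ' ') →
    sF '\\' p (sN (sF ')' p l) none) = comb p l := by
  intro n
  induction n with
  | zero =>
    intro l p h _ _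
    have : l = [] := List.eq_nil_of_length_eq_zero (Nat.le_zero.mp h)
    subst this
    simp [sF, sN, comb]
  | succ n ih =>
    intro l p hlen hch hhd
    match l with
    | [] => simp [sF, sN, comb]
    | c :: t =>
      by_cases hcs : c = ' '
      · subst hcs
        have hp : p ≠ some ' ' := fun h => hhd h (by simp)
        match t with
        | [] =>
          by_cases hp1 : p = some ')' <;> by_cases hp2 : p = some '\\' <;>
            simp [sF, sN, nxtOf, comb, hp1, hp2]
        | d :: u =>
          have hds : d ≠ ' ' := by
            have hcc := (List.isChain_cons_cons.mp hch).1
            exact fun hh => hcc ⟨rfl, hh⟩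
          have hchu : (d :: u).IsChain spR := (List.isChain_cons.mp hch).2
          have hIH := ih u (some d) (by simp at hlen; omega)
            (List.isChain_cons.mp hchu).2
            (fun hh => absurd (Option.some.inj hh) hds)
          by_cases hd : d = '('
          · subst hd
            by_cases hp1 : p = some ')' <;> by_cases hp2 : p = some '\\' <;>
              simp [sF, sN, nxtOf, comb, hp1, hp2, hds, hIH]
          · by_cases hp1 : p = some ')' <;> by_cases hp2 : p = some '\\' <;>
              simp [sF, sN, nxtOf, comb, hp1, hp2, hd, hds, hIH]
      · have e1 : sF ')' p (c :: t) = c :: sF ')' (some c) t := by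
          rw [sF, if_neg (fun hh => hcs hh.1)]
        have e2 : sN (c :: sF ')' (some c) t) none = c :: sN (sF ')' (some c) t) none := by
          rw [sN, if_neg (fun hh => hcs hh.1)]
        have e3 : sF '\\' p (c :: sN (sF ')' (some c) t) none)
            = c :: sF '\\' (some c) (sN (sF ')' (some c) t) none) := by
          rw [sF, if_neg (fun hh => hcs hh.1)]
        rw [e1, e2, e3, comb, if_neg (fun hh => hcs hh.1)]
        exact congrArg _ (ih t (some c) (by simp at hlen; omega)
          (List.isChain_cons.mp hch).2 (fun hh => absurd (Option.some.inj hh) hcs))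

-- B's zip3 comprehension is the comb machine
theorem zip_comb : ∀ (l : List Char) (p : Option Char),
    ((l.zip ((p :: l.dropLast.map some).zip (l.tail.map some ++ [none]))).filter
      (fun x => !(x.1 == ' ' && (x.2.1 == some ')' || x.2.1 == some '\\' || x.2.2 == some '(')))).map (·.1)
      = comb p l := by
  intro l
  induction l with
  | nil => intro p; simp [comb]
  | cons c t ih =>
    intro p
    cases t with
    | nil =>
      by_cases h1 : c = ' ' <;> by_cases h2 : p = some ')' <;> by_cases h3 : p = some '\\' <;>
        simp [comb, h1, h2, h3, List.filter]
    | cons d u =>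
      have hzip : (c :: d :: u).zip (((p :: (c :: d :: u).dropLast.map some)).zip
          (((c :: d :: u).tail.map some ++ [none])))
          = (c, (p, some d)) :: ((d :: u).zip ((some c :: (d :: u).dropLast.map some).zip
            ((d :: u).tail.map some ++ [none]))) := by
        simp
      rw [hzip]
      simp only [List.filter_cons]
      have hbiff : ((!(c == ' ' && (p == some ')' || p == some '\\' || (some d : Option Char) == some '('))) = true)
          ↔ ¬(c = ' ' ∧ (p = some ')' ∨ p = some '\\' ∨ (d :: u).head? = some '(')) := by
        simp only [List.head?_cons, Option.some.injEq]
        simp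
        tauto
      by_cases hcnd : c = ' ' ∧ (p = some ')' ∨ p = some '\\' ∨ (d :: u).head? = some '(')
      · rw [if_neg (fun hh => (hbiff.mp hh) hcnd)]
        rw [ih (some c)]
        rw [show comb p (c :: d :: u) = comb (some c) (d :: u) from by rw [comb, if_pos hcnd]]
      · rw [if_pos (hbiff.mpr hcnd)]
        rw [List.map_cons, ih (some c)]
        rw [show comb p (c :: d :: u) = c :: comb (some c) (d :: u) from by rw [comb, if_neg hcnd]]

-- A's forward loops, started at index 0 with flag False, as prev-char filters
theorem pass13_eq (tc : Char) (htc : tc ≠ ' ') (l : List Char) (hch : l.IsChain spR) :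
    passFwd tc l.length l 0 false = sF tc none l := by
  rw [passFwd_eq tc l.length l 0 false (by omega), List.take_zero, List.drop_zero,
    List.nil_append]
  exact pF_eq_sF tc htc l false none hch (by simp) (Or.inl (by simp))

-- A's backward loop, started at the last index with flag False, as a next-char filter
theorem pass2_eq (X : List Char) (hchX : X.IsChain spR) :
    passBwd (X.length + X.length) X (PySem.List.len X - 1) false = sN X none := by
  by_cases hX : X = []
  · subst hX
    rfl
  · have hlen : 0 < X.length := Nat.pos_of_ne_zero (fun h0 => hX (List.eq_nil_of_length_eq_zero h0))
    rw [show PySem.List.len X - 1 = ((X.length - 1 : Nat) : Int) from by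
      rw [PySem.List.len_eq]; omega]
    rw [passBwd_eq (X.length + X.length) X (X.length - 1) false (by omega) (by omega) (by simp)]
    rw [show X.length - 1 + 1 = X.length from by omega]
    rw [List.take_length, List.drop_length, List.append_nil]
    rw [pF_eq_sF '(' (by decide) X.reverse false none (chain_reverse_spR hchX) (by simp)
      (Or.inl (by simp))]
    exact sF_rev X none

-- ===== VERDICT (by name: the statement is the Claim_ definition above) =====
theorem remove_excess_spaces_spec : Claim_equal_remove_excess_spaces := by
  intro s _
  unfold Spec_remove_excess_spaces
  simp only [remove_excess_spaces, remove_excess_spaces_alt]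
  rw [collapseA_eq s.toList.length s.toList le_rfl]
  rw [show s.toList.foldl (fun acc c => if c = ' ' ∧ acc.getLast? = some ' ' then acc else acc ++ [c])
      ([] : List Char) = col none s.toList from by simpa using foldl_col s.toList []]
  rw [PySem.List.slice_to_neg_one, PySem.List.slice_from_one, zip_comb (col none s.toList) none]
  have hchC : (col none s.toList).IsChain spR := (chain_col s.toList none).1
  rw [pass13_eq ')' (by decide) _ hchC]
  rw [pass2_eq _ ((chain_sF ')' (col none s.toList) none hchC).1)]
  have hchY : (sN (sF ')' none (col none s.toList)) none).IsChain spR := by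
    rw [← sF_rev]
    exact chain_reverse_spR (chain_sF '(' (sF ')' none (col none s.toList)).reverse none
      (chain_reverse_spR (chain_sF ')' (col none s.toList) none hchC).1)).1
  rw [pass13_eq '\\' (by decide) _ hchY]
  rw [comp_eq (col none s.toList).length _ none le_rfl hchC (by simp)]
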